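-- pv_equiv track=rewrite | github.com/KrishnaM313/MasterThesis | scripts/tools_parties.py | getPartyIdeology
-- ===== SOURCE A (Python) =====
-- def getPartyIdeologyAssociations():
--     return {
--         "Left-wing" : ["GUE/NGL", "The Left"],
--         "Social democrats" : ["S&D"],
--         "Greens and regionalists": ["Verts/ALE"],
--         "Liberals and centrists": ["ALDE", "ELDR", "Renew", "LDR"],
--         "Christian democrats and conservatives" : ["PPE", "ECR", "RDE"],
--         "Eurosceptic conservatives": ["EFDD","IND/DEM"],
--         "Far-right nationalists": ["ID", "ENF"],
--         "Non-Inscrits": ["NI"]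
--     }
--
-- def getPartyIdeology(party):
--     if isinstance(party, str):
--         party = party.strip()
--
--     ideologies =  getPartyIdeologyAssociations()
--     associatedIdeology = None
--     for ideology in ideologies:
--         if party in ideologies[ideology]:
--             associatedIdeology = ideology
--     if associatedIdeology is None:
--         associatedIdeology = "na"
--     return associatedIdeology
--
--     # https://en.wikipedia.org/wiki/European_Parliament
--     # https://www.europe-politique.eu/parlement-europeen.htm
--
--     return party
-- ===== SOURCE B (Python) =====
-- _PARTY_TO_IDEOLOGY = {
--     abbr: ideology
--     for ideology, abbrs in {
--         "Left-wing": ["GUE/NGL", "The Left"],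
--         "Social democrats": ["S&D"],
--         "Greens and regionalists": ["Verts/ALE"],
--         "Liberals and centrists": ["ALDE", "ELDR", "Renew", "LDR"],
--         "Christian democrats and conservatives": ["PPE", "ECR", "RDE"],
--         "Eurosceptic conservatives": ["EFDD", "IND/DEM"],
--         "Far-right nationalists": ["ID", "ENF"],
--         "Non-Inscrits": ["NI"],
--     }.items()
--     for abbr in abbrs
-- }
--
-- def getPartyIdeology(party):
--     if isinstance(party, str):
--         party = party.strip()
--     try:
--         return _PARTY_TO_IDEOLOGY[party]
--     except (KeyError, TypeError):
--         return "na"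
-- ===== Notes on version B (the rewrite author's own statement) =====
-- stated objective: idiomatic
-- what changed: Replaced the loop over the ideology->parties dict with nested membership tests by a flattened party->ideology reverse dict built once at module load, so getPartyIdeology is a single lookup with a default fallback.
import Mathlib
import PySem

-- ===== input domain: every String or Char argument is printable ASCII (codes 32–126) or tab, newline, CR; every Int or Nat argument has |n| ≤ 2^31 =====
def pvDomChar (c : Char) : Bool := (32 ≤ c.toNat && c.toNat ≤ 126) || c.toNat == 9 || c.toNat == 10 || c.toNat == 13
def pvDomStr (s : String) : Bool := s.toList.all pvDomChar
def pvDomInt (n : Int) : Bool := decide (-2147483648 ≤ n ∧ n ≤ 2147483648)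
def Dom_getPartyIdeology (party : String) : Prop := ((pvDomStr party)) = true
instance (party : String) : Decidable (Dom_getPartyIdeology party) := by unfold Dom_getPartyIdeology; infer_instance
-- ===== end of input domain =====

-- B replaces A's per-call scan over the ideology→parties dict by one flattened
-- party→ideology reverse dict built once, looked up directly (idiomatic; no speed claim).

-- ===== PORT A =====
def getPartyIdeologyAssociations : PySem.Dict String (List String) :=
  PySem.Dict.mk [
    ("Left-wing", ["GUE/NGL", "The Left"]),
    ("Social democrats", ["S&D"]),
    ("Greens and regionalists", ["Verts/ALE"]),
    ("Liberals and centrists", ["ALDE", "ELDR", "Renew", "LDR"]),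
    ("Christian democrats and conservatives", ["PPE", "ECR", "RDE"]),
    ("Eurosceptic conservatives", ["EFDD", "IND/DEM"]),
    ("Far-right nationalists", ["ID", "ENF"]),
    ("Non-Inscrits", ["NI"])]

def getPartyIdeology (party : String) : String :=
  let party := PySem.Str.strip party
  let ideologies := getPartyIdeologyAssociations
  let associatedIdeology : Option String :=
    ideologies.keys.foldl
      (fun acc ideology =>
        if (ideologies.getD ideology []).contains party then some ideology else acc)
      none
  match associatedIdeology with
  | none => "na"
  | some i => i

-- ===== PORT B =====
def partyToIdeology : PySem.Dict String String :=
  PySem.Dict.mk [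
    ("GUE/NGL", "Left-wing"), ("The Left", "Left-wing"),
    ("S&D", "Social democrats"),
    ("Verts/ALE", "Greens and regionalists"),
    ("ALDE", "Liberals and centrists"), ("ELDR", "Liberals and centrists"),
    ("Renew", "Liberals and centrists"), ("LDR", "Liberals and centrists"),
    ("PPE", "Christian democrats and conservatives"),
    ("ECR", "Christian democrats and conservatives"),
    ("RDE", "Christian democrats and conservatives"),
    ("EFDD", "Eurosceptic conservatives"), ("IND/DEM", "Eurosceptic conservatives"),
    ("ID", "Far-right nationalists"), ("ENF", "Far-right nationalists"),
    ("NI", "Non-Inscrits")]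

def getPartyIdeology_alt (party : String) : String :=
  let p := PySem.Str.strip party
  match partyToIdeology.get? p with
  | some v => v
  | none => "na"

-- ===== PRECONDITION & SPEC =====
def Spec_getPartyIdeology (party : String) (out : String) : Prop := out = getPartyIdeology_alt party
instance (party : String) (out : String) : Decidable (Spec_getPartyIdeology party out) := by unfold Spec_getPartyIdeology; infer_instance

-- ===== CLAIM (what is proved, stated in full; the proofs are below) =====
def Claim_equal_getPartyIdeology : Prop := ∀ (party : String), Dom_getPartyIdeology party → Spec_getPartyIdeology party (getPartyIdeology party)

-- ===== LEMMAS AND PROOFS =====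
theorem core_eq (s : String) :
    (match
      (getPartyIdeologyAssociations.keys.foldl
        (fun acc ideology =>
          if (getPartyIdeologyAssociations.getD ideology []).contains s then some ideology else acc)
        none) with
     | none => "na"
     | some i => i) =
    (match partyToIdeology.get? s with
     | some v => v
     | none => "na") := by
  by_cases h : s ∈ (["GUE/NGL", "The Left", "S&D", "Verts/ALE", "ALDE", "ELDR", "Renew",
      "LDR", "PPE", "ECR", "RDE", "EFDD", "IND/DEM", "ID", "ENF", "NI"] : List String)
  · fin_cases h <;> rfl
  · simp only [List.mem_cons, List.not_mem_nil, or_false, not_or] at h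
    obtain ⟨h1, h2, h3, h4, h5, h6, h7, h8, h9, h10, h11, h12, h13, h14, h15, h16⟩ := h
    simp [getPartyIdeologyAssociations, partyToIdeology, PySem.Dict.keys_mk,
      PySem.Dict.getD, List.contains_eq_mem,
      h1, h2, h3, h4, h5, h6, h7, h8, h9, h10, h11, h12, h13, h14, h15, h16,
      Ne.symm h1, Ne.symm h2, Ne.symm h3, Ne.symm h4, Ne.symm h5, Ne.symm h6, Ne.symm h7,
      Ne.symm h8, Ne.symm h9, Ne.symm h10, Ne.symm h11, Ne.symm h12, Ne.symm h13,
      Ne.symm h14, Ne.symm h15, Ne.symm h16, PySem.Dict.get?]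

-- ===== VERDICT (by name: the statement is the Claim_ definition above) =====
theorem getPartyIdeology_spec : Claim_equal_getPartyIdeology := by
  intro party _
  unfold Spec_getPartyIdeology getPartyIdeology getPartyIdeology_alt
  exact core_eq (PySem.Str.strip party)
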